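-- pv_equiv track=rewrite | github.com/USomsiadZ/Python | praktyki 2023/Panstwa/Panstwa.py | woj
-- ===== SOURCE A (Python) =====
-- woja =  {'id':0,'1':'Mazowieckie','ida':0},{'id':0,'1':'Wielkopolskie','ida':1},{'id':0,'1':'slaskie','ida':2},{'id':1,'1':'Ruskimal','ida':0},{'id':1,'1':'Nowy Ruskimal','ida':1},{'id':1,'1':'Stary Ruskimal','ida':2},{'id':2,'1':'Niemkimal','ida':0},{'id':2,'1':'Nowy Niemkimal','ida':1},{'id':2,'1':'Stary Niemkimal','ida':2}
--
-- def woj(a):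
--     xx  = 0
--     keyo = []
--     for i in woja:
--         if i['id']==a:
--             keyo.insert(xx, xx)
--         xx = xx + 1
--     woj = [woja[key]['1'] for key in keyo]
--     wojid = [woja[key]['ida'] for key in keyo]
--
--     return woj,wojid
-- ===== SOURCE B (Python) =====
-- woja =  {'id':0,'1':'Mazowieckie','ida':0},{'id':0,'1':'Wielkopolskie','ida':1},{'id':0,'1':'slaskie','ida':2},{'id':1,'1':'Ruskimal','ida':0},{'id':1,'1':'Nowy Ruskimal','ida':1},{'id':1,'1':'Stary Ruskimal','ida':2},{'id':2,'1':'Niemkimal','ida':0},{'id':2,'1':'Nowy Niemkimal','ida':1},{'id':2,'1':'Stary Niemkimal','ida':2}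
--
-- def woj(a):
--     names = []
--     ids = []
--     for entry in woja:
--         if entry['id'] == a:
--             names.append(entry['1'])
--             ids.append(entry['ida'])
--     return names, ids
-- ===== Notes on version B (the rewrite author's own statement) =====
-- stated objective: simpler
-- what changed: Replaced A's three-pass structure (build an index list via counter+insert, then two comprehensions re-indexing the table) with one direct pass that appends the name and id of each matching entry.
import Mathlib
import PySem

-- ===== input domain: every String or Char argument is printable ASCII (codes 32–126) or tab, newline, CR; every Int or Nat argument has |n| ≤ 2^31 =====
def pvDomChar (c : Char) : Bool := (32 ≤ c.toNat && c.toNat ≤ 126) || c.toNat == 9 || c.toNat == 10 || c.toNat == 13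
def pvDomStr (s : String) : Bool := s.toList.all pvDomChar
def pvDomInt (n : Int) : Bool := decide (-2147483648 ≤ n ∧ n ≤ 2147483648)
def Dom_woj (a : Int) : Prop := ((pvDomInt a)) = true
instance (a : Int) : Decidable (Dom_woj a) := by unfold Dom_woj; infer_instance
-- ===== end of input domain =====

-- B replaces A's three passes (counter+insert index list, then two comprehensions re-indexing the table)
-- with one direct pass appending matching names and ids; objective: simpler.

-- the module-level table `woja`: each dict {'id':…, '1':…, 'ida':…} as (id, name, ida)
def wojaL : List (Int × String × Int) :=
  [(0, "Mazowieckie", 0), (0, "Wielkopolskie", 1), (0, "slaskie", 2),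
   (1, "Ruskimal", 0), (1, "Nowy Ruskimal", 1), (1, "Stary Ruskimal", 2),
   (2, "Niemkimal", 0), (2, "Nowy Niemkimal", 1), (2, "Stary Niemkimal", 2)]

-- ===== PORT A =====
def woj (a : Int) : List String × List Int :=
  -- xx = 0; keyo = []; for i in woja: if i['id']==a: keyo.insert(xx, xx); xx += 1
  let st := wojaL.foldl
    (fun (st : Int × List Int) i =>
      let keyo := if i.1 == a then PySem.List.insert st.2 st.1 st.1 else st.2
      (st.1 + 1, keyo))
    (0, [])
  -- woja[key] indexing: pyGet? with a default for the (unreachable) out-of-range case —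
  -- every key in keyo is a valid index of woja, so this is exact
  let names := st.2.map (fun key => ((PySem.List.pyGet? wojaL key).getD (0, "", 0)).2.1)
  let ids := st.2.map (fun key => ((PySem.List.pyGet? wojaL key).getD (0, "", 0)).2.2)
  (names, ids)

-- ===== PORT B =====
def woj_alt (a : Int) : List String × List Int :=
  wojaL.foldl
    (fun (st : List String × List Int) e =>
      if e.1 == a then (st.1 ++ [e.2.1], st.2 ++ [e.2.2]) else st)
    ([], [])

-- ===== PRECONDITION & SPEC =====
def Spec_woj (a : Int) (out : List String × List Int) : Prop := out = woj_alt a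
instance (a : Int) (out : List String × List Int) : Decidable (Spec_woj a out) := by unfold Spec_woj; infer_instance

-- ===== CLAIM (what is proved, stated in full; the proofs are below) =====
def Claim_equal_woj : Prop := ∀ (a : Int), Dom_woj a → Spec_woj a (woj a)

-- ===== LEMMAS AND PROOFS =====

-- ===== VERDICT (by name: the statement is the Claim_ definition above) =====
theorem woj_spec : Claim_equal_woj := by
  intro a _
  unfold Spec_woj
  by_cases h0 : a = 0
  · subst h0; decide
  by_cases h1 : a = 1
  · subst h1; decide
  by_cases h2 : a = 2
  · subst h2; decide
  have e0 : ¬ (0 : Int) = a := fun h => h0 h.symm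
  have e1 : ¬ (1 : Int) = a := fun h => h1 h.symm
  have e2 : ¬ (2 : Int) = a := fun h => h2 h.symm
  simp [woj, woj_alt, wojaL, e0, e1, e2]
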